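-- pv_equiv track=rewrite | github.com/Chingfood/TTIC31160_bioinfo | hw3/HW3_QingyuanLiu.py | seq_idx
-- ===== SOURCE A (Python) =====
-- def seq_idx(seq):
--     #change the letter sequence to index sequence
--     seq_lst = []
--     counter = 0
--     for i in seq:
--         if i.isalpha():
--             seq_lst.append(counter)
--             counter +=1
--         else:
--             seq_lst.append(-1)
--     return seq_lst
-- ===== SOURCE B (Python) =====
-- def seq_idx(seq):
--     # Two-pass decomposition: boolean alpha mask, then prefix counts, then a zip map.
--     flags = [c.isalpha() for c in seq]
--     counts = []
--     total = 0
--     for f in flags: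
--         total += f
--         counts.append(total)
--     return [n - 1 if f else -1 for f, n in zip(flags, counts)]
-- ===== Notes on version B (the rewrite author's own statement) =====
-- stated objective: alternative
-- what changed: Replaces the single loop threading a mutable counter and emitting as it goes with a mask/prefix-sum/zip-map pipeline: compute the alpha flags, their running counts, then map (flag, count) to count-1 or -1.
import Mathlib
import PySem

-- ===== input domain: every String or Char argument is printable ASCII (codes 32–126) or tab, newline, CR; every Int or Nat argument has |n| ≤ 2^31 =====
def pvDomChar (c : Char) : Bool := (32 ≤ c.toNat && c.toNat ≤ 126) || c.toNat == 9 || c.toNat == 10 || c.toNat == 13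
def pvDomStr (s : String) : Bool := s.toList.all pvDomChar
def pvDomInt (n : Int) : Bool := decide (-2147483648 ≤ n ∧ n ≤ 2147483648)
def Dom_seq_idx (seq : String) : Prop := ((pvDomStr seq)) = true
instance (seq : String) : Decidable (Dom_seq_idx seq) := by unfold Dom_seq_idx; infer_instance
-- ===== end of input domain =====

-- ===== PORT A =====
-- A: one loop threading (output list, counter); B: mask -> prefix counts -> zip map.
def seq_idx (seq : String) : List Int :=
  (seq.toList.foldl
    (fun (st : List Int × Int) i =>
      if PySem.Chars.isalpha i then (st.1 ++ [st.2], st.2 + 1) else (st.1 ++ [-1], st.2))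
    ([], 0)).1

-- ===== PORT B =====
def seq_idx_alt (seq : String) : List Int :=
  let flags := seq.toList.map PySem.Chars.isalpha
  let counts :=
    (flags.foldl
      (fun (st : List Int × Int) f =>
        let total := st.2 + (if f then 1 else 0)
        (st.1 ++ [total], total))
      ([], 0)).1
  (flags.zip counts).map (fun p => if p.1 then p.2 - 1 else -1)

-- ===== PRECONDITION & SPEC =====
def Spec_seq_idx (seq : String) (out : List Int) : Prop := out = seq_idx_alt seq
instance (seq : String) (out : List Int) : Decidable (Spec_seq_idx seq out) := by unfold Spec_seq_idx; infer_instance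

-- ===== CLAIM (what is proved, stated in full; the proofs are below) =====
def Claim_equal_seq_idx : Prop := ∀ (seq : String), Dom_seq_idx seq → Spec_seq_idx seq (seq_idx seq)

-- ===== LEMMAS AND PROOFS =====

/-- Reference recursion both ports are reduced to. -/
def sidxSpec : List Char → Int → List Int
  | [], _ => []
  | x :: xs, c =>
      if PySem.Chars.isalpha x then c :: sidxSpec xs (c + 1) else -1 :: sidxSpec xs c

/-- Running prefix counts of a flag list, starting at t. -/
def cntSpec : List Bool → Int → List Int
  | [], _ => []
  | f :: fs, t => (t + (if f then 1 else 0)) :: cntSpec fs (t + (if f then 1 else 0))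

theorem foldlA (cs : List Char) (acc : List Int) (c : Int) :
    (cs.foldl
      (fun (st : List Int × Int) i =>
        if PySem.Chars.isalpha i then (st.1 ++ [st.2], st.2 + 1) else (st.1 ++ [-1], st.2))
      (acc, c)).1 = acc ++ sidxSpec cs c := by
  induction cs generalizing acc c with
  | nil => simp [sidxSpec]
  | cons x xs ih =>
      by_cases h : PySem.Chars.isalpha x <;> simp [sidxSpec, h, ih]

theorem foldlC (fs : List Bool) (acc : List Int) (t : Int) :
    (fs.foldl
      (fun (st : List Int × Int) f =>
        let total := st.2 + (if f then 1 else 0)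
        (st.1 ++ [total], total))
      (acc, t)).1 = acc ++ cntSpec fs t := by
  induction fs generalizing acc t with
  | nil => simp [cntSpec]
  | cons f fs ih => simp [cntSpec, ih]

theorem zipmap (cs : List Char) (t : Int) :
    ((cs.map PySem.Chars.isalpha).zip (cntSpec (cs.map PySem.Chars.isalpha) t)).map
      (fun p => if p.1 then p.2 - 1 else -1) = sidxSpec cs t := by
  induction cs generalizing t with
  | nil => simp [sidxSpec, cntSpec]
  | cons x xs ih =>
      by_cases h : PySem.Chars.isalpha x <;>
        simp [sidxSpec, cntSpec, h, ih]

-- ===== VERDICT (by name: the statement is the Claim_ definition above) =====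
theorem seq_idx_spec : Claim_equal_seq_idx := by
  intro seq _
  unfold Spec_seq_idx seq_idx seq_idx_alt
  rw [foldlA]
  simp only []
  rw [foldlC]
  simp [zipmap]
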